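-- pv_equiv track=rewrite | github.com/MAHNOOR80/Backend | agent.py | _handle_greeting_query
-- ===== SOURCE A (Python) =====
-- def _handle_greeting_query(query: str) -> str:
--     """
--     Generate a response for greeting or low-intent queries.
--
--     Args:
--         query: The user query (greeting or low-intent)
--
--     Returns:
--         A friendly response to the greeting or low-intent query
--     """
--     normalized_query = query.lower().strip()
--
--     # Handle different types of greetings
--     if any(greeting in normalized_query for greeting in ['hello', 'hi', 'hey', 'greetings']):
--         return ("Hello! I'm your AI assistant for the Humanoid Robotics Textbook. "
--                "I can help answer questions about humanoid robotics concepts, theories, and applications. "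
--                "What would you like to know about humanoid robotics?")
--
--     elif any(phrase in normalized_query for phrase in ['how are you', 'how do you do', 'what\'s up', 'how\'s it going']):
--         return ("I'm doing well, thank you for asking! I'm here to help you learn about humanoid robotics. "
--                "Feel free to ask me any questions about the textbook content.")
--
--     elif any(phrase in normalized_query for phrase in ['who are you', 'what are you', 'what is your name', 'introduce yourself', 'tell me about yourself']):
--         return ("I'm an AI assistant designed specifically for the Humanoid Robotics Textbook. "
--                "I can answer questions about humanoid robotics by retrieving and analyzing content from the textbook. "
--                "Ask me anything about the book!")
--
--     elif any(phrase in normalized_query for phrase in ['what can you do', 'what are you capable of', 'what are your capabilities']):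
--         return ("I can help you with questions about humanoid robotics by searching the textbook content. "
--                "I can explain concepts, find specific information, and provide detailed answers grounded in the textbook. "
--                "Try asking me about specific topics like 'inverse kinematics', 'gait planning', or 'humanoid control systems'.")
--
--     elif any(thanks in normalized_query for thanks in ['thanks', 'thank you', 'thx', 'appreciate it', 'gracias', 'merci', 'danke']):
--         return ("You're welcome! I'm happy to help. If you have any questions about humanoid robotics, feel free to ask!")
--
--     elif any(bye in normalized_query for bye in ['bye', 'goodbye', 'see you', 'farewell', 'ciao', 'adios', 'au revoir']):
--         return ("Goodbye! Feel free to come back if you have any questions about humanoid robotics. Have a great day!")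
--
--     elif any(help_word in normalized_query for help_word in ['help', 'please help', 'can you help', 'can you assist', 'assist me']):
--         return ("I'm here to help! You can ask me questions about humanoid robotics topics covered in the textbook. "
--                "For example, you could ask 'What is inverse kinematics?' or 'Explain gait planning in humanoid robots.' "
--                "I'll search the textbook content to provide accurate answers.")
--
--     else:
--         # Default response for other low-intent queries
--         return ("I'm here to help with questions about humanoid robotics from the textbook. "
--                "Could you ask me something specific about the content? For example: "
--                "'What are the main challenges in humanoid locomotion?' or "
--                "'Explain the control systems used in humanoid robots.'")
-- ===== SOURCE B (Python) =====
-- _KEYWORD_GROUPS = [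
--     ['hello', 'hi', 'hey', 'greetings'],
--     ['how are you', 'how do you do', 'what\'s up', 'how\'s it going'],
--     ['who are you', 'what are you', 'what is your name', 'introduce yourself', 'tell me about yourself'],
--     ['what can you do', 'what are you capable of', 'what are your capabilities'],
--     ['thanks', 'thank you', 'thx', 'appreciate it', 'gracias', 'merci', 'danke'],
--     ['bye', 'goodbye', 'see you', 'farewell', 'ciao', 'adios', 'au revoir'],
--     ['help', 'please help', 'can you help', 'can you assist', 'assist me'],
-- ]
--
-- _RESPONSES = [
--     ("Hello! I'm your AI assistant for the Humanoid Robotics Textbook. "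
--      "I can help answer questions about humanoid robotics concepts, theories, and applications. "
--      "What would you like to know about humanoid robotics?"),
--     ("I'm doing well, thank you for asking! I'm here to help you learn about humanoid robotics. "
--      "Feel free to ask me any questions about the textbook content."),
--     ("I'm an AI assistant designed specifically for the Humanoid Robotics Textbook. "
--      "I can answer questions about humanoid robotics by retrieving and analyzing content from the textbook. "
--      "Ask me anything about the book!"),
--     ("I can help you with questions about humanoid robotics by searching the textbook content. "
--      "I can explain concepts, find specific information, and provide detailed answers grounded in the textbook. "
--      "Try asking me about specific topics like 'inverse kinematics', 'gait planning', or 'humanoid control systems'."),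
--     ("You're welcome! I'm happy to help. If you have any questions about humanoid robotics, feel free to ask!"),
--     ("Goodbye! Feel free to come back if you have any questions about humanoid robotics. Have a great day!"),
--     ("I'm here to help! You can ask me questions about humanoid robotics topics covered in the textbook. "
--      "For example, you could ask 'What is inverse kinematics?' or 'Explain gait planning in humanoid robots.' "
--      "I'll search the textbook content to provide accurate answers."),
-- ]
--
-- _DEFAULT_RESPONSE = (
--     "I'm here to help with questions about humanoid robotics from the textbook. "
--     "Could you ask me something specific about the content? For example: "
--     "'What are the main challenges in humanoid locomotion?' or "
--     "'Explain the control systems used in humanoid robots.'")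
--
-- # Flat keyword -> group-priority index (all keywords are distinct across groups).
-- _KEYWORD_TO_GROUP = {kw: i for i, kws in enumerate(_KEYWORD_GROUPS) for kw in kws}
--
--
-- def _handle_greeting_query(query: str) -> str:
--     normalized_query = query.lower().strip()
--     # Single pass over the flat keyword index, keeping the minimum matching
--     # group priority; the answer is selected by that priority afterwards.
--     best = len(_RESPONSES)
--     for kw, g in _KEYWORD_TO_GROUP.items():
--         if kw in normalized_query and g < best:
--             best = g
--     return _RESPONSES[best] if best < len(_RESPONSES) else _DEFAULT_RESPONSE
-- ===== Notes on version B (the rewrite author's own statement) =====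
-- stated objective: alternative
-- what changed: Replaces the if/elif chain of per-group any() checks with a flat keyword->priority dict scanned once to compute the minimum matching group index, then a single indexed lookup into a response list.
import Mathlib
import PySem

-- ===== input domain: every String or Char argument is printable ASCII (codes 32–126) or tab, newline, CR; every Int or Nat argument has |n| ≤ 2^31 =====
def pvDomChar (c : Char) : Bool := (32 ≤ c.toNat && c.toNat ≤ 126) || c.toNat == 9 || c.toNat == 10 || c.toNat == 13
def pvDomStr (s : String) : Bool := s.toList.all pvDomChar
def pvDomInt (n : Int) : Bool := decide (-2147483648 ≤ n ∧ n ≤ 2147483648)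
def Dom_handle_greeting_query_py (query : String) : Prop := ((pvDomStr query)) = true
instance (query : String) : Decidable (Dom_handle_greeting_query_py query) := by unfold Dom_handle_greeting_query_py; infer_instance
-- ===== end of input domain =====

-- B replaces A's if/elif chain with a flat keyword->group-priority index scanned once for the
-- minimum matching priority, followed by one indexed lookup; objective: alternative decomposition.

-- ===== PORT A =====
def handle_greeting_query_py (query : String) : String :=
  let normalized_query := PySem.Str.strip (PySem.Str.lower query)
  if (["hello", "hi", "hey", "greetings"] : List String).any (fun g => PySem.Str.isIn g normalized_query) then
    "Hello! I'm your AI assistant for the Humanoid Robotics Textbook. I can help answer questions about humanoid robotics concepts, theories, and applications. What would you like to know about humanoid robotics?"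
  else if (["how are you", "how do you do", "what's up", "how's it going"] : List String).any (fun g => PySem.Str.isIn g normalized_query) then
    "I'm doing well, thank you for asking! I'm here to help you learn about humanoid robotics. Feel free to ask me any questions about the textbook content."
  else if (["who are you", "what are you", "what is your name", "introduce yourself", "tell me about yourself"] : List String).any (fun g => PySem.Str.isIn g normalized_query) then
    "I'm an AI assistant designed specifically for the Humanoid Robotics Textbook. I can answer questions about humanoid robotics by retrieving and analyzing content from the textbook. Ask me anything about the book!"
  else if (["what can you do", "what are you capable of", "what are your capabilities"] : List String).any (fun g => PySem.Str.isIn g normalized_query) then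
    "I can help you with questions about humanoid robotics by searching the textbook content. I can explain concepts, find specific information, and provide detailed answers grounded in the textbook. Try asking me about specific topics like 'inverse kinematics', 'gait planning', or 'humanoid control systems'."
  else if (["thanks", "thank you", "thx", "appreciate it", "gracias", "merci", "danke"] : List String).any (fun g => PySem.Str.isIn g normalized_query) then
    "You're welcome! I'm happy to help. If you have any questions about humanoid robotics, feel free to ask!"
  else if (["bye", "goodbye", "see you", "farewell", "ciao", "adios", "au revoir"] : List String).any (fun g => PySem.Str.isIn g normalized_query) then
    "Goodbye! Feel free to come back if you have any questions about humanoid robotics. Have a great day!"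
  else if (["help", "please help", "can you help", "can you assist", "assist me"] : List String).any (fun g => PySem.Str.isIn g normalized_query) then
    "I'm here to help! You can ask me questions about humanoid robotics topics covered in the textbook. For example, you could ask 'What is inverse kinematics?' or 'Explain gait planning in humanoid robots.' I'll search the textbook content to provide accurate answers."
  else
    "I'm here to help with questions about humanoid robotics from the textbook. Could you ask me something specific about the content? For example: 'What are the main challenges in humanoid locomotion?' or 'Explain the control systems used in humanoid robots.'"

-- ===== PORT B =====
def pvGroups : List (List String) :=
  [["hello", "hi", "hey", "greetings"],
   ["how are you", "how do you do", "what's up", "how's it going"],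
   ["who are you", "what are you", "what is your name", "introduce yourself", "tell me about yourself"],
   ["what can you do", "what are you capable of", "what are your capabilities"],
   ["thanks", "thank you", "thx", "appreciate it", "gracias", "merci", "danke"],
   ["bye", "goodbye", "see you", "farewell", "ciao", "adios", "au revoir"],
   ["help", "please help", "can you help", "can you assist", "assist me"]]

def pvResponses : List String :=
  ["Hello! I'm your AI assistant for the Humanoid Robotics Textbook. I can help answer questions about humanoid robotics concepts, theories, and applications. What would you like to know about humanoid robotics?",
   "I'm doing well, thank you for asking! I'm here to help you learn about humanoid robotics. Feel free to ask me any questions about the textbook content.",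
   "I'm an AI assistant designed specifically for the Humanoid Robotics Textbook. I can answer questions about humanoid robotics by retrieving and analyzing content from the textbook. Ask me anything about the book!",
   "I can help you with questions about humanoid robotics by searching the textbook content. I can explain concepts, find specific information, and provide detailed answers grounded in the textbook. Try asking me about specific topics like 'inverse kinematics', 'gait planning', or 'humanoid control systems'.",
   "You're welcome! I'm happy to help. If you have any questions about humanoid robotics, feel free to ask!",
   "Goodbye! Feel free to come back if you have any questions about humanoid robotics. Have a great day!",
   "I'm here to help! You can ask me questions about humanoid robotics topics covered in the textbook. For example, you could ask 'What is inverse kinematics?' or 'Explain gait planning in humanoid robots.' I'll search the textbook content to provide accurate answers."]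

def pvDefaultResponse : String := "I'm here to help with questions about humanoid robotics from the textbook. Could you ask me something specific about the content? For example: 'What are the main challenges in humanoid locomotion?' or 'Explain the control systems used in humanoid robots.'"

-- flat keyword -> group-priority index, built from the groups (Python's dict comprehension;
-- keywords are distinct, so dict insertion order = this flattened order)
def pvFlatten : Nat → List (List String) → List (String × Nat)
  | _, [] => []
  | k, g :: gs => g.map (fun kw => (kw, k)) ++ pvFlatten (k + 1) gs

def pvKeywordIndex : List (String × Nat) := pvFlatten 0 pvGroups

def handle_greeting_query_py_alt (query : String) : String :=
  let normalized_query := PySem.Str.strip (PySem.Str.lower query)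
  let best := pvKeywordIndex.foldl
    (fun best p => if PySem.Str.isIn p.1 normalized_query && decide (p.2 < best) then p.2 else best)
    pvResponses.length
  if best < pvResponses.length then pvResponses.getD best pvDefaultResponse else pvDefaultResponse

-- ===== PRECONDITION & SPEC =====
def Spec_handle_greeting_query_py (query : String) (out : String) : Prop := out = handle_greeting_query_py_alt query
instance (query : String) (out : String) : Decidable (Spec_handle_greeting_query_py query out) := by unfold Spec_handle_greeting_query_py; infer_instance

-- ===== CLAIM (what is proved, stated in full; the proofs are below) =====
def Claim_equal_handle_greeting_query_py : Prop := ∀ (query : String), Dom_handle_greeting_query_py query → Spec_handle_greeting_query_py query (handle_greeting_query_py query)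

-- ===== LEMMAS AND PROOFS =====

-- first matching group index starting from k; d if none matches
def pvFirstHit (nq : String) : Nat → List (List String) → Nat → Nat
  | _, [], d => d
  | k, g :: gs, d => if g.any (fun kw => PySem.Str.isIn kw nq) then k else pvFirstHit nq (k + 1) gs d

theorem pvGroupFold (nq : String) (g : List String) (k a : Nat) :
    (g.map (fun kw => (kw, k))).foldl
      (fun best p => if PySem.Str.isIn p.1 nq && decide (p.2 < best) then p.2 else best) a
    = if g.any (fun kw => PySem.Str.isIn kw nq) && decide (k < a) then k else a := by
  induction g generalizing a with
  | nil => simp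
  | cons kw g ih =>
    simp only [List.map_cons, List.foldl_cons, List.any_cons]
    rcases (PySem.Str.isIn kw nq).eq_false_or_eq_true with h | h
    · rcases (decide (k < a)).eq_false_or_eq_true with hk | hk
      · simp only [h, hk, Bool.and_self, Bool.true_or, reduceIte]
        rw [ih]
        have hkk : decide (k < k) = false := by simp
        simp
      · simp only [h, hk, Bool.true_or, Bool.and_false]
        rw [ih]
        simp [hk]
    · simp only [h, Bool.false_and, Bool.false_or]
      exact ih a

theorem pvTailFold (nq : String) (gs : List (List String)) (k a : Nat) (h : a ≤ k) :
    (pvFlatten k gs).foldl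
      (fun best p => if PySem.Str.isIn p.1 nq && decide (p.2 < best) then p.2 else best) a = a := by
  induction gs generalizing k a with
  | nil => simp [pvFlatten]
  | cons g gs ih =>
    simp only [pvFlatten, List.foldl_append, pvGroupFold]
    have hk : decide (k < a) = false := by simp; omega
    simp only [hk, Bool.and_false, Bool.false_eq_true, if_false]
    exact ih (k + 1) a (by omega)

theorem pvFoldHit (nq : String) (gs : List (List String)) (k d : Nat) (h : k + gs.length ≤ d) :
    (pvFlatten k gs).foldl
      (fun best p => if PySem.Str.isIn p.1 nq && decide (p.2 < best) then p.2 else best) d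
    = pvFirstHit nq k gs d := by
  induction gs generalizing k with
  | nil => simp [pvFlatten, pvFirstHit]
  | cons g gs ih =>
    simp only [List.length_cons] at h
    simp only [pvFlatten, pvFirstHit, List.foldl_append, pvGroupFold]
    rcases (g.any (fun kw => PySem.Str.isIn kw nq)).eq_false_or_eq_true with hg | hg
    · have hk : decide (k < d) = true := by simp; omega
      simp only [hg, hk, Bool.and_self, reduceIte]
      exact pvTailFold nq gs (k + 1) k (by omega)
    · simp only [hg, Bool.false_and, Bool.false_eq_true, if_false]
      exact ih (k + 1) (by omega)

-- ===== VERDICT (by name: the statement is the Claim_ definition above) =====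
theorem handle_greeting_query_py_spec : Claim_equal_handle_greeting_query_py := by
  intro query _
  unfold Spec_handle_greeting_query_py
  simp only [handle_greeting_query_py, handle_greeting_query_py_alt, pvKeywordIndex]
  rw [pvFoldHit _ pvGroups 0 pvResponses.length (by decide)]
  simp only [show pvResponses.length = 7 from rfl, pvGroups, pvFirstHit]
  split_ifs <;> first | rfl | omega
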